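-- pv_equiv track=rewrite | github.com/Health-Informatics-UoN/carrot-transform | carrottransform/tools/core_v2.py | _get_concept_combinations
-- ===== SOURCE A (Python) =====
-- from typing import Dict, List, Optional, Tuple, Any
--
-- def _get_concept_combinations(value_mapping: Optional[Dict[str, List[int]]]) -> List[Dict[str, int]]:
--     """
--     Generate all concept combinations for multiple concept IDs
--
--     For example, if value_mapping is:
--     {
--         "observation_concept_id": [35827395, 35825531],
--         "observation_source_concept_id": [35827395, 35825531]
--     }
--
--     This returns:
--     [
--         {"observation_concept_id": 35827395, "observation_source_concept_id": 35827395},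
--         {"observation_concept_id": 35825531, "observation_source_concept_id": 35825531}
--     ]
--     """
--     if not value_mapping:
--         return []
--
--     # Find the maximum number of concept IDs across all fields
--     max_concepts = max(len(concept_ids) for concept_ids in value_mapping.values() if concept_ids)
--
--     combinations = []
--     for i in range(max_concepts):
--         combo = {}
--         for dest_field, concept_ids in value_mapping.items():
--             if concept_ids:
--                 # Use the concept at index i, or the last one if not enough concepts
--                 concept_index = min(i, len(concept_ids) - 1)
--                 combo[dest_field] = concept_ids[concept_index]
--         combinations.append(combo)
--
--     return combinations
-- ===== SOURCE B (Python) =====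
-- from typing import Dict, List, Optional
--
--
-- def _get_concept_combinations(value_mapping: Optional[Dict[str, List[int]]]) -> List[Dict[str, int]]:
--     if not value_mapping:
--         return []
--     # allocate all rows up front, then fill them column by column (one pass per field)
--     rows = [{} for _ in range(max(len(ids) for ids in value_mapping.values() if ids))]
--     for field, ids in value_mapping.items():
--         if not ids:
--             continue
--         for row, cid in zip(rows, ids):
--             row[field] = cid
--         last = ids[-1]
--         for row in rows[len(ids):]:
--             row[field] = last
--     return rows
-- ===== Notes on version B (the rewrite author's own statement) =====
-- stated objective: alternative
-- what changed: B transposes the loop nesting: it allocates all result rows up front and fills them column-by-column (one pass per field: zip its ids onto the leading rows, then fill the remaining rows with the field's last id), instead of A's row-by-row nested loop with min(i, len-1) index clamping.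
import Mathlib
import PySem

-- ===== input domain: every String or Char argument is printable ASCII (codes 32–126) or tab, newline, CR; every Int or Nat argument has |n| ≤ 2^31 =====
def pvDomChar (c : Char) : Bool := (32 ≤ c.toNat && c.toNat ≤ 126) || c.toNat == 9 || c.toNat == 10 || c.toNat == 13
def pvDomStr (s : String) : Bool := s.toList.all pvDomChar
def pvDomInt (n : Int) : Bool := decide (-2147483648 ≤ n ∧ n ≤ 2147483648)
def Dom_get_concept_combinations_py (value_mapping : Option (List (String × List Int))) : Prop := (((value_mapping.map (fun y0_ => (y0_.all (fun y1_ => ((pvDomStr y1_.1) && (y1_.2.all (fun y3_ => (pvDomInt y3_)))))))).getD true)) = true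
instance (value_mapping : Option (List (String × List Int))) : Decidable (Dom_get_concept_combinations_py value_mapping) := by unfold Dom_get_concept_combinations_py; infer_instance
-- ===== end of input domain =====

-- B allocates all result rows up front and fills them column-by-column (one pass per field),
-- instead of A's row-by-row nested loop with min(i, len-1) clamping; alternative, same cost.

-- ===== PORT A =====
def get_concept_combinations_py (value_mapping : Option (List (String × List Int))) : List (List (String × Int)) :=
  match value_mapping with
  | none => []
  | some l =>
    if l.isEmpty then []
    else
      -- max(len(concept_ids) for concept_ids in value_mapping.values() if concept_ids); none = Python ValueError, excluded by Pre_
      match ((l.filter (fun p => ¬ p.2.isEmpty)).map (fun p => p.2.length)).max? with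
      | none => []
      | some maxConcepts =>
        (List.range maxConcepts).foldl (fun combinations i =>
          let combo := l.foldl (fun (combo : PySem.Dict String Int) p =>
            if ¬ p.2.isEmpty then
              -- concept_ids[min(i, len-1)]: index always in range since p.2 ≠ []
              combo.insert p.1 (p.2.getD (min i (p.2.length - 1)) 0)
            else combo) PySem.Dict.empty
          combinations ++ [combo.items]) []

-- ===== PORT B =====
-- one column pass: zip ids onto the leading rows, then fill the remaining rows with the last id
-- (Python's in-place mutation of rows is rendered as rebuilding the rows list)
def pvFillColumn (rows : List (PySem.Dict String Int)) (p : String × List Int) :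
    List (PySem.Dict String Int) :=
  if p.2.isEmpty then rows
  else
    let k := p.2.length
    let rows1 := (rows.zip p.2).map (fun rc => rc.1.insert p.1 rc.2) ++ rows.drop k
    rows1.take k ++ (rows1.drop k).map (fun r => r.insert p.1 (p.2.getLast?.getD 0))

def get_concept_combinations_py_alt (value_mapping : Option (List (String × List Int))) : List (List (String × Int)) :=
  match value_mapping with
  | none => []
  | some l =>
    if l.isEmpty then []
    else
      -- max(len(ids) for ids in value_mapping.values() if ids); none = Python ValueError, excluded by Pre_
      match ((l.filter (fun p => ¬ p.2.isEmpty)).map (fun p => p.2.length)).max? with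
      | none => []
      | some maxConcepts =>
        let rows0 : List (PySem.Dict String Int) :=
          (List.range maxConcepts).map (fun _ => PySem.Dict.empty)
        (l.foldl pvFillColumn rows0).map (fun d => d.items)

-- ===== PRECONDITION & SPEC =====
-- Pre_ excludes only the inputs where A raises ValueError (max() of an empty sequence):
-- a non-empty mapping in which every field's concept list is empty. B raises there too.
def Pre_get_concept_combinations_py (value_mapping : Option (List (String × List Int))) : Prop :=
  value_mapping.getD [] = [] ∨ ∃ p ∈ value_mapping.getD [], p.2 ≠ []
instance (value_mapping : Option (List (String × List Int))) : Decidable (Pre_get_concept_combinations_py value_mapping) := by unfold Pre_get_concept_combinations_py; infer_instance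

def pvWitness_get_concept_combinations_py : (Option (List (String × List Int))) := some [("a", [1, 2]), ("b", [3])]

def Spec_get_concept_combinations_py (value_mapping : Option (List (String × List Int))) (out : List (List (String × Int))) : Prop := out = get_concept_combinations_py_alt value_mapping
instance (value_mapping : Option (List (String × List Int))) (out : List (List (String × Int))) : Decidable (Spec_get_concept_combinations_py value_mapping out) := by unfold Spec_get_concept_combinations_py; infer_instance

-- ===== CLAIM (what is proved, stated in full; the proofs are below) =====
def Claim_equal_get_concept_combinations_py : Prop := ∀ (value_mapping : Option (List (String × List Int))), Dom_get_concept_combinations_py value_mapping → Pre_get_concept_combinations_py value_mapping → Spec_get_concept_combinations_py value_mapping (get_concept_combinations_py value_mapping)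

-- ===== LEMMAS AND PROOFS =====


def pvRowStep (i : Nat) (combo : PySem.Dict String Int) (p : String × List Int) :
    PySem.Dict String Int :=
  if ¬ p.2.isEmpty then combo.insert p.1 (p.2.getD (min i (p.2.length - 1)) 0) else combo

theorem pvFillColumn_getElem? (rows : List (PySem.Dict String Int)) (p : String × List Int)
    (i : Nat) :
    (pvFillColumn rows p)[i]? = (rows[i]?).map (fun r => pvRowStep i r p) := by
  unfold pvFillColumn pvRowStep
  by_cases hp : p.2.isEmpty
  · simp [hp]
  · have hne : p.2 ≠ [] := by simpa [List.isEmpty_iff] using hp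
    have hk : 0 < p.2.length := List.length_pos_of_ne_nil hne
    simp only [hp, Bool.false_eq_true, not_false_eq_true, if_true, if_false]
    set k := p.2.length with hkdef
    set rows1 := (rows.zip p.2).map (fun rc => rc.1.insert p.1 rc.2) ++ rows.drop k with hr1
    have hlen1 : rows1.length = rows.length := by
      simp [hr1, hkdef]; omega
    have hlt : (rows1.take k).length = min k rows.length := by
      rw [List.length_take, hlen1]
    have hlz : ((rows.zip p.2).map (fun rc => rc.1.insert p.1 rc.2)).length = min rows.length k := by
      simp [hkdef]
    rcases Nat.lt_or_ge i rows.length with hi | hi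
    · rcases Nat.lt_or_ge i k with hik | hik
      · -- zip phase
        have hmin : min i (k - 1) = i := by omega
        have htk : i < (rows1.take k).length := by rw [hlt]; omega
        rw [List.getElem?_append, if_pos htk, List.getElem?_take, if_pos hik, hr1,
            List.getElem?_append]
        have hz : i < ((rows.zip p.2).map (fun rc => rc.1.insert p.1 rc.2)).length := by
          rw [hlz]; omega
        rw [if_pos hz, List.getElem?_map]
        have hzi : (rows.zip p.2)[i]? = some (rows[i], p.2[i]) := by
          rw [List.getElem?_zip_eq_some]
          exact ⟨List.getElem?_eq_getElem hi, List.getElem?_eq_getElem hik⟩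
        rw [hzi, List.getElem?_eq_getElem hi]
        simp [hmin, List.getD_eq_getElem?_getD, List.getElem?_eq_getElem hik]
      · -- trailing phase
        have htk : ¬ i < (rows1.take k).length := by rw [hlt]; omega
        rw [List.getElem?_append, if_neg htk, List.getElem?_map, List.getElem?_drop]
        have harg : k + (i - (rows1.take k).length) = i := by rw [hlt]; omega
        rw [harg, hr1, List.getElem?_append]
        have hz : ¬ i < ((rows.zip p.2).map (fun rc => rc.1.insert p.1 rc.2)).length := by
          rw [hlz]; omega
        rw [if_neg hz, List.getElem?_drop]
        have harg2 : k + (i - ((rows.zip p.2).map (fun rc => rc.1.insert p.1 rc.2)).length) = i := by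
          rw [hlz]; omega
        rw [harg2, List.getElem?_eq_getElem hi]
        have hmin : min i (k - 1) = k - 1 := by omega
        have hlast : p.2.getLast?.getD 0 = p.2.getD (k - 1) 0 := by
          rw [List.getLast?_eq_getElem?, List.getD_eq_getElem?_getD]
        simp [hmin, hlast]
    · -- out of range: both none
      have h1 : rows[i]? = none := List.getElem?_eq_none (by omega)
      have htk : ¬ i < (rows1.take k).length := by rw [hlt]; omega
      rw [List.getElem?_append, if_neg htk, List.getElem?_map, List.getElem?_drop, h1]
      rw [List.getElem?_eq_none (by rw [hlen1]; omega)]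
      rfl


theorem pv_foldl_fill_getElem? (l : List (String × List Int))
    (rows : List (PySem.Dict String Int)) (i : Nat) :
    (l.foldl pvFillColumn rows)[i]? = (rows[i]?).map (fun r => l.foldl (fun c q => pvRowStep i c q) r) := by
  induction l generalizing rows with
  | nil => simp
  | cons p t ih =>
    simp only [List.foldl_cons]
    rw [ih, pvFillColumn_getElem?]
    cases rows[i]? <;> simp

-- accumulate-by-append over a range is a map
theorem pv_foldl_append_map {α β : Type} (L : List α) (f : α → β) (acc : List β) :
    L.foldl (fun a i => a ++ [f i]) acc = acc ++ L.map f := by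
  induction L generalizing acc with
  | nil => simp
  | cons x t ih => simp [List.foldl_cons, ih]

-- ===== VERDICT (by name: the statement is the Claim_ definition above) =====
theorem get_concept_combinations_py_spec : Claim_equal_get_concept_combinations_py := by
  intro vm _dom _hpre
  unfold Spec_get_concept_combinations_py get_concept_combinations_py get_concept_combinations_py_alt
  match vm with
  | none => rfl
  | some l =>
    by_cases hl : l.isEmpty
    · simp [hl]
    · simp only [hl]
      cases hmax : ((l.filter (fun p => ¬ p.2.isEmpty)).map (fun p => p.2.length)).max? with
      | none => rfl
      | some M =>
        dsimp only
        rw [pv_foldl_append_map]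
        simp only [List.nil_append]
        apply List.ext_getElem?
        intro i
        simp only [Bool.false_eq_true, if_false]
        rw [List.getElem?_map (l := List.foldl pvFillColumn _ l), pv_foldl_fill_getElem?,
            List.getElem?_map, List.getElem?_map]
        by_cases hi : i < M
        · rw [List.getElem?_eq_getElem (by simpa using hi)]
          simp [pvRowStep]
        · rw [List.getElem?_eq_none (l := List.range M) (by simpa using hi)]
          rfl
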